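-- pv_equiv track=rewrite | github.com/sorihanul/wiki-runtime | scripts/wiki_runtime.py | render_canon_note
-- ===== SOURCE A (Python) =====
-- def format_metadata_line(key: str, value: str) -> str:
--     return f"- {key}: `{value}`"
--
-- def render_canon_note(
--     title: str,
--     metadata: dict[str, str],
--     canon_lines: list[str],
--     evidence_lines: list[str],
--     supersession_lines: list[str],
-- ) -> str:
--     key_order = [
--         "promoted_from",
--         "promoted_at",
--         "merged_from",
--         "merged_at",
--         "claim_state",
--         "evidence",
--         "evidence_mode",
--         "freshness",
--         "confidence",
--         "confidence_basis",
--         "scope",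
--         "supersession",
--         "stale_flag",
--         "conflict_with",
--         "source_count",
--         "source_count_basis",
--         "last_reviewed",
--         "temporal_state",
--         "canon_kind",
--     ]
--     metadata_lines = [format_metadata_line(key, metadata[key]) for key in key_order if key in metadata]
--     for key in metadata:
--         if key not in key_order:
--             metadata_lines.append(format_metadata_line(key, metadata[key]))
--
--     body = [
--         f"# {title}",
--         "",
--         *metadata_lines,
--         "",
--         "## canon",
--         *(canon_lines or ["- canon content is derived from the source note."]),
--         "",
--         "## evidence",
--         *(evidence_lines or ["- no evidence listed"]),
--         "",
--         "## supersession",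
--         *(supersession_lines or ["- none"]),
--     ]
--     return "\n".join(body).rstrip() + "\n"
-- ===== SOURCE B (Python) =====
-- def format_metadata_line(key: str, value: str) -> str:
--     return f"- {key}: `{value}`"
--
-- def render_canon_note(
--     title: str,
--     metadata: dict[str, str],
--     canon_lines: list[str],
--     evidence_lines: list[str],
--     supersession_lines: list[str],
-- ) -> str:
--     key_order = [
--         "promoted_from",
--         "promoted_at",
--         "merged_from",
--         "merged_at",
--         "claim_state",
--         "evidence",
--         "evidence_mode",
--         "freshness",
--         "confidence",
--         "confidence_basis",
--         "scope",
--         "supersession",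
--         "stale_flag",
--         "conflict_with",
--         "source_count",
--         "source_count_basis",
--         "last_reviewed",
--         "temporal_state",
--         "canon_kind",
--     ]
--
--     def pick(order, items):
--         if not order:
--             return [format_metadata_line(k, v) for k, v in items]
--         head = order[0]
--         hits = [format_metadata_line(k, v) for k, v in items if k == head]
--         return hits + pick(order[1:], [(k, v) for k, v in items if k != head])
--
--     body = [f"# {title}", "", *pick(key_order, list(metadata.items()))]
--     for name, lines, default in (
--         ("canon", canon_lines, "- canon content is derived from the source note."),
--         ("evidence", evidence_lines, "- no evidence listed"),
--         ("supersession", supersession_lines, "- none"),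
--     ):
--         body += ["", f"## {name}", *(lines or [default])]
--     return "\n".join(body).rstrip() + "\n"
-- ===== Notes on version B (the rewrite author's own statement) =====
-- stated objective: alternative
-- what changed: B builds the metadata lines by a recursive partition of the dict items along key_order (each step takes the hits of the head key and recurses on the remaining items), replacing A's two passes with membership tests in both directions, and assembles the three trailing sections by a fold over a section table instead of one literal splice.
import Mathlib
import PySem

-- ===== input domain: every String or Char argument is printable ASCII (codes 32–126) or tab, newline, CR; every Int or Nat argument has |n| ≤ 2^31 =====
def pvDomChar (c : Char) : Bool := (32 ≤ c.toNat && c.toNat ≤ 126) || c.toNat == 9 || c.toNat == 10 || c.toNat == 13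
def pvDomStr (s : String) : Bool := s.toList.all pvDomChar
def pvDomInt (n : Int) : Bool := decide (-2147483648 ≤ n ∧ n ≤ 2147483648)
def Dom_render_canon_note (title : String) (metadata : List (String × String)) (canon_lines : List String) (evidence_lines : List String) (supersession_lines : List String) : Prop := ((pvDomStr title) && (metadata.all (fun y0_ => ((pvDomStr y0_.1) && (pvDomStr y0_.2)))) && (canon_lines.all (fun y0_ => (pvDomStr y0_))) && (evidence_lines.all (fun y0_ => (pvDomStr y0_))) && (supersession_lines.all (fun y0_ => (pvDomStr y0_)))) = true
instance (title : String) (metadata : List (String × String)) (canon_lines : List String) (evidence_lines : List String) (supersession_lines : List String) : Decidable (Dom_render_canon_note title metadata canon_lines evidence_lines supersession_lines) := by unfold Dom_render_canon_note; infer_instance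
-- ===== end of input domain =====

-- B replaces A's two-pass filter-then-append assembly of the metadata lines by a recursive
-- partition of the dict items along key_order, and assembles the three sections by a fold
-- over a section table (objective: alternative; same cost).

-- ===== PORT A =====
def format_metadata_line (key : String) (value : String) : String :=
  "- " ++ key ++ ": `" ++ value ++ "`"

def pvKeyOrder : List String :=
  ["promoted_from", "promoted_at", "merged_from", "merged_at", "claim_state",
   "evidence", "evidence_mode", "freshness", "confidence", "confidence_basis",
   "scope", "supersession", "stale_flag", "conflict_with", "source_count",
   "source_count_basis", "last_reviewed", "temporal_state", "canon_kind"]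

def render_canon_note (title : String) (metadata : List (String × String)) (canon_lines : List String) (evidence_lines : List String) (supersession_lines : List String) : String :=
  let d : PySem.Dict String String := PySem.Dict.ofList metadata
  let key_order := pvKeyOrder
  let metadata_lines :=
    (key_order.filter (fun key => d.contains key)).map
      (fun key => format_metadata_line key (d.getD key ""))
  let metadata_lines :=
    (PySem.Dict.keys d).foldl
      (fun acc key =>
        if key_order.contains key then acc
        else acc ++ [format_metadata_line key (d.getD key "")])
      metadata_lines
  let body :=
    ["# " ++ title, ""] ++ metadata_lines ++ ["", "## canon"]
      ++ (if canon_lines.isEmpty then ["- canon content is derived from the source note."] else canon_lines)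
      ++ ["", "## evidence"]
      ++ (if evidence_lines.isEmpty then ["- no evidence listed"] else evidence_lines)
      ++ ["", "## supersession"]
      ++ (if supersession_lines.isEmpty then ["- none"] else supersession_lines)
  PySem.Str.rstrip (PySem.Str.join "\n" body) ++ "\n"

-- ===== PORT B =====
def pvFmtB (p : String × String) : String :=
  "- " ++ p.1 ++ ": `" ++ p.2 ++ "`"

def pvPick : List String → List (String × String) → List String
  | [], items => items.map pvFmtB
  | head :: rest, items =>
      (items.filter (fun p => p.1 == head)).map pvFmtB
        ++ pvPick rest (items.filter (fun p => p.1 != head))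

def render_canon_note_alt (title : String) (metadata : List (String × String)) (canon_lines : List String) (evidence_lines : List String) (supersession_lines : List String) : String :=
  let items := (PySem.Dict.ofList metadata : PySem.Dict String String).items
  let sections : List (String × List String × String) :=
    [("canon", canon_lines, "- canon content is derived from the source note."),
     ("evidence", evidence_lines, "- no evidence listed"),
     ("supersession", supersession_lines, "- none")]
  let body :=
    sections.foldl
      (fun acc s => acc ++ ["", "## " ++ s.1] ++ (if s.2.1.isEmpty then [s.2.2] else s.2.1))
      (["# " ++ title, ""] ++ pvPick pvKeyOrder items)
  PySem.Str.rstrip (PySem.Str.join "\n" body) ++ "\n"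

-- ===== PRECONDITION & SPEC =====
def Spec_render_canon_note (title : String) (metadata : List (String × String)) (canon_lines : List String) (evidence_lines : List String) (supersession_lines : List String) (out : String) : Prop := out = render_canon_note_alt title metadata canon_lines evidence_lines supersession_lines
instance (title : String) (metadata : List (String × String)) (canon_lines : List String) (evidence_lines : List String) (supersession_lines : List String) (out : String) : Decidable (Spec_render_canon_note title metadata canon_lines evidence_lines supersession_lines out) := by unfold Spec_render_canon_note; infer_instance

-- ===== CLAIM (what is proved, stated in full; the proofs are below) =====
def Claim_equal_render_canon_note : Prop := ∀ (title : String) (metadata : List (String × String)) (canon_lines : List String) (evidence_lines : List String) (supersession_lines : List String), Dom_render_canon_note title metadata canon_lines evidence_lines supersession_lines → Spec_render_canon_note title metadata canon_lines evidence_lines supersession_lines (render_canon_note title metadata canon_lines evidence_lines supersession_lines)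

-- ===== LEMMAS AND PROOFS =====

-- the two formatting helpers agree (same f-string)
theorem pvFmtB_eq (p : String × String) : pvFmtB p = format_metadata_line p.1 p.2 := rfl

-- pvPick on any item list: for each key of a nodup `ko`, in order, all its hits; then the leftovers.
theorem pvPick_eq (ko : List String) : ∀ items : List (String × String), ko.Nodup →
    pvPick ko items =
      ko.flatMap (fun k => (items.filter (fun p => p.1 == k)).map pvFmtB)
        ++ (items.filter (fun p => !ko.contains p.1)).map pvFmtB := by
  induction ko with
  | nil => intro items _; simp [pvPick]
  | cons head rest ih =>
    intro items hnd
    obtain ⟨hhead, hrest⟩ := List.nodup_cons.mp hnd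
    rw [pvPick, ih _ hrest, List.flatMap_cons, List.append_assoc]
    congr 1
    congr 1
    · apply List.flatMap_congr
      intro k hk
      have hne : k ≠ head := fun h => hhead (h ▸ hk)
      congr 1
      rw [List.filter_filter]
      apply List.filter_congr; intro a _
      by_cases hak : a.1 = k <;> simp [hak, hne]
    · congr 1
      rw [List.filter_filter]
      apply List.filter_congr; intro a _
      by_cases hah : a.1 = head <;> simp [hah]

-- with nodup keys, the hits of one key are exactly what the dict lookup yields
theorem pvFilterKey (l : List (String × String)) (k : String)
    (hnd : (l.map Prod.fst).Nodup) :
    (l.filter (fun p => p.1 == k)).map pvFmtB =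
      ((PySem.Dict.mk l).get? k).elim [] (fun v => [format_metadata_line k v]) := by
  induction l with
  | nil => simp [PySem.Dict.get?]
  | cons a l ih =>
    have hnd' : (a.1 :: l.map Prod.fst).Nodup := by simpa using hnd
    obtain ⟨ha, hl⟩ := List.nodup_cons.mp hnd' 
    rw [PySem.Dict.get?_mk_cons]
    by_cases h : a.1 = k
    · subst h
      have : l.filter (fun p => p.1 == a.1) = [] := by
        rw [List.filter_eq_nil_iff]
        intro p hp hpk
        exact ha (List.mem_map.mpr ⟨p, hp, beq_iff_eq.mp hpk⟩)
      simp [this, pvFmtB_eq]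
    · have hb : (a.1 == k) = false := beq_eq_false_iff_ne.mpr h
      simp only [List.filter_cons, hb, Bool.false_eq_true, if_false]
      exact ih hl

-- A's first pass (ordered keys present in the dict) in flatMap form
theorem pvPartA1 (d : PySem.Dict String String) (hnd : d.keys.Nodup) (ko : List String) :
    (ko.filter (fun key => d.contains key)).map
        (fun key => format_metadata_line key (d.getD key "")) =
      ko.flatMap (fun k => (d.items.filter (fun p => p.1 == k)).map pvFmtB) := by
  induction ko with
  | nil => simp
  | cons k ko ih =>
    obtain ⟨l⟩ := d
    rw [List.flatMap_cons, ← ih, pvFilterKey l k hnd]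
    rw [List.filter_cons]
    rw [PySem.Dict.contains_eq_isSome_get?]
    cases h : (PySem.Dict.mk l).get? k with
    | none => simp
    | some v =>
      have : (PySem.Dict.mk l).getD k "" = v := by
        show ((PySem.Dict.mk l).get? k).getD "" = v
        rw [h]; rfl
      simp [this]

-- A's second pass (keys outside key_order) as a filtered map over the items
theorem pvPartA2 (d : PySem.Dict String String) (hnd : d.keys.Nodup) (ko : List String)
    (init : List String) :
    d.keys.foldl
        (fun acc key =>
          if ko.contains key then acc
          else acc ++ [format_metadata_line key (d.getD key "")])
        init =
      init ++ (d.items.filter (fun p => !ko.contains p.1)).map pvFmtB := by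
  have hf : (fun (acc : List String) key =>
        if ko.contains key then acc
        else acc ++ [format_metadata_line key (d.getD key "")]) =
      (fun acc key =>
        if !ko.contains key then acc ++ [format_metadata_line key (d.getD key "")] else acc) := by
    funext acc key
    cases ko.contains key <;> simp
  rw [hf, PySem.List.foldl_append_if]
  congr 1
  have hkeys : d.keys = d.items.map Prod.fst := rfl
  rw [hkeys, List.filter_map, List.map_map]
  apply List.map_congr_left
  intro p hp
  obtain ⟨k, v⟩ := p
  have hpmem : (k, v) ∈ d.items := (List.mem_filter.mp hp).1
  have : d.getD k "" = v := PySem.Dict.getD_of_mem_items d hpmem hnd ""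
  simp [Function.comp, this, pvFmtB_eq]

-- the metadata lines agree
theorem pvMeta_eq (metadata : List (String × String)) :
    ((PySem.Dict.keys (PySem.Dict.ofList metadata)).foldl
        (fun acc key =>
          if pvKeyOrder.contains key then acc
          else acc ++ [format_metadata_line key ((PySem.Dict.ofList metadata).getD key "")])
        ((pvKeyOrder.filter (fun key => (PySem.Dict.ofList metadata).contains key)).map
          (fun key => format_metadata_line key ((PySem.Dict.ofList metadata).getD key "")))) =
      pvPick pvKeyOrder (PySem.Dict.ofList metadata : PySem.Dict String String).items := by
  have hnd : (PySem.Dict.ofList metadata : PySem.Dict String String).keys.Nodup :=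
    PySem.Dict.nodup_keys_ofList metadata
  rw [pvPartA2 _ hnd, pvPartA1 _ hnd,
    pvPick_eq pvKeyOrder _ (by unfold pvKeyOrder; decide)]

-- ===== VERDICT (by name: the statement is the Claim_ definition above) =====
theorem render_canon_note_spec : Claim_equal_render_canon_note := by
  intro title metadata canon_lines evidence_lines supersession_lines _
  unfold Spec_render_canon_note render_canon_note render_canon_note_alt
  simp only [List.foldl_cons, List.foldl_nil, pvMeta_eq]
  simp [List.append_assoc]
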